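-- pv_equiv track=rewrite | github.com/divyesh27/temp | PythonPractice/src/IsomorphicString.py | find_match_string
-- ===== SOURCE A (Python) =====
-- from typing import Optional, Dict, List
--
-- def find_match_string(s1: Optional[str], s2: Optional[str]) -> bool:
--     if s1 is None or s2 is None:
--         raise ValueError("Pass valid input")
--
--     if len(s1) != len(s2):
--         return False
--
--     s1_count = {}
--     s1_values = []
--     s2_count = {}
--     s2_values = []
--
--     for c in s1:
--         s1_count[c] = s1_count.get(c, 0) + 1
--
--     for count in s1_count.values():
--         s1_values.append(count)
--
--     for c in s2:
--         s2_count[c] = s2_count.get(c, 0) + 1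
--
--     for count in s2_count.values():
--         s2_values.append(count)
--
--     for count in s1_count.values():
--         if count not in s2_values:
--             return False
--
--     for count in s2_count.values():
--         if count not in s1_values:
--             return False
--
--     return True
-- ===== SOURCE B (Python) =====
-- def _runs(s):
--     # run lengths of the sorted string: equal characters become one run,
--     # so the list of run lengths is the list of character multiplicities
--     out = []
--     prev = None
--     n = 0
--     for c in sorted(s):
--         if c == prev:
--             n += 1
--         else:
--             if prev is not None:
--                 out.append(n)
--             prev, n = c, 1
--     if prev is not None:
--         out.append(n)
--     return out
--
--
-- def find_match_string(s1, s2):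
--     if s1 is None or s2 is None:
--         raise ValueError("Pass valid input")
--     if len(s1) != len(s2):
--         return False
--     # A only compares the distinct multiplicity values by two-way membership,
--     # i.e. as sets
--     return set(_runs(s1)) == set(_runs(s2))
-- ===== Notes on version B (the rewrite author's own statement) =====
-- stated objective: alternative
-- what changed: Replaces A's dict-based counting (two hand-built count dicts, two value-copy loops, two directional membership loops) with a sort-then-scan algorithm: sort each string, collect run lengths of equal characters in one linear scan (run lengths of a sorted string are exactly the character multiplicities), and compare the two run-length sets with one set equality, preserving A's set (not multiset) semantics.
import Mathlib
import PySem

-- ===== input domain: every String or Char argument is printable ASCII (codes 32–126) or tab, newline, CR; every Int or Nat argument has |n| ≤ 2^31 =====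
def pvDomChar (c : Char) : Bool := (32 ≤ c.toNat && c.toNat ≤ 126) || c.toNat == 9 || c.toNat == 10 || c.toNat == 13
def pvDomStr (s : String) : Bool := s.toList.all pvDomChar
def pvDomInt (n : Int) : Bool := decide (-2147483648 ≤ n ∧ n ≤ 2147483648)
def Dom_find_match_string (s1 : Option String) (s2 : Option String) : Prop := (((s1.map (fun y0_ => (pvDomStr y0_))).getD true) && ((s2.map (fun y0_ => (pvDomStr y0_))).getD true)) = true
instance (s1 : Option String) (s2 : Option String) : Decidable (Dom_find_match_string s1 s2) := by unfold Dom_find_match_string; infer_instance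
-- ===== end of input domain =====

-- B replaces A's hand-built counting dicts + value-copy loops + two directional membership
-- loops by a sort-then-run-length scan per string and one set equality (objective: alternative).


-- ===== PORT A =====
def find_match_string (s1 : Option String) (s2 : Option String) : Bool :=
  match s1, s2 with
  | none, _ => false      -- Python raises ValueError here; excluded by Pre_
  | _, none => false      -- Python raises ValueError here; excluded by Pre_
  | some a, some b =>
    if a.toList.length ≠ b.toList.length then false
    else
      -- for c in s1: s1_count[c] = s1_count.get(c, 0) + 1   (= Dict.modify, exact)
      let s1_count : PySem.Dict Char Int :=
        a.toList.foldl (fun d c => d.modify c 0 (· + 1)) PySem.Dict.empty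
      let s1_values : List Int := s1_count.values.foldl (fun acc count => acc ++ [count]) []
      let s2_count : PySem.Dict Char Int :=
        b.toList.foldl (fun d c => d.modify c 0 (· + 1)) PySem.Dict.empty
      let s2_values : List Int := s2_count.values.foldl (fun acc count => acc ++ [count]) []
      if !(s1_count.values.all (fun count => s2_values.contains count)) then false
      else if !(s2_count.values.all (fun count => s1_values.contains count)) then false
      else true

-- ===== PORT B =====
-- one step of _runs's loop: state (out, prev, n)
def pvRunStep (st : List Int × Option Char × Int) (c : Char) : List Int × Option Char × Int :=
  if st.2.1 = some c then (st.1, st.2.1, st.2.2 + 1)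
  else ((if st.2.1.isSome then st.1 ++ [st.2.2] else st.1), some c, 1)

-- _runs(s): run lengths of sorted(s)
def pvRuns (s : String) : List Int :=
  let st := (PySem.List.sorted s.toList (fun c => c) false).foldl pvRunStep ([], none, 0)
  match st.2.1 with
  | none => st.1
  | some _ => st.1 ++ [st.2.2]

def find_match_string_alt (s1 : Option String) (s2 : Option String) : Bool :=
  match s1, s2 with
  | none, _ => false      -- Python raises ValueError here; excluded by Pre_
  | _, none => false      -- Python raises ValueError here; excluded by Pre_
  | some a, some b =>
    if a.toList.length ≠ b.toList.length then false
    else PySem.Set.equal (PySem.Set.ofList (pvRuns a)) (PySem.Set.ofList (pvRuns b))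

-- ===== PRECONDITION & SPEC =====
-- Pre_ excludes exactly the None arguments, on which A raises ValueError.
def Pre_find_match_string (s1 : Option String) (s2 : Option String) : Prop :=
  s1 ≠ none ∧ s2 ≠ none
instance (s1 : Option String) (s2 : Option String) : Decidable (Pre_find_match_string s1 s2) := by
  unfold Pre_find_match_string; infer_instance

def pvWitness_find_match_string : Option String × Option String := (some "aab", some "abb")

def Spec_find_match_string (s1 : Option String) (s2 : Option String) (out : Bool) : Prop := out = find_match_string_alt s1 s2
instance (s1 : Option String) (s2 : Option String) (out : Bool) : Decidable (Spec_find_match_string s1 s2 out) := by unfold Spec_find_match_string; infer_instance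

-- ===== CLAIM (what is proved, stated in full; the proofs are below) =====
def Claim_equal_find_match_string : Prop := ∀ (s1 : Option String) (s2 : Option String), Dom_find_match_string s1 s2 → Pre_find_match_string s1 s2 → Spec_find_match_string s1 s2 (find_match_string s1 s2)

-- ===== LEMMAS AND PROOFS =====

-- structural run-length encoding (proof-side mirror of the fold in pvRuns)
def pvRL : List Char → List Int
  | [] => []
  | c :: t => (((t.takeWhile (· == c)).length : Int) + 1) :: pvRL (t.dropWhile (· == c))
  termination_by m => m.length
  decreasing_by
    simpa [Nat.lt_succ_iff] using List.length_dropWhile_le (· == c) t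

def pvFin (st : List Int × Option Char × Int) : List Int :=
  match st.2.1 with
  | none => st.1
  | some _ => st.1 ++ [st.2.2]

-- the fold's invariant: mid-run state (out, some c, n)
theorem pv_fold_runs (t : List Char) : ∀ (c : Char) (n : Int) (out : List Int),
    pvFin (t.foldl pvRunStep (out, some c, n))
      = out ++ ((n + ((t.takeWhile (· == c)).length : Int)) :: pvRL (t.dropWhile (· == c))) := by
  induction t with
  | nil => intro c n out; simp [pvFin, pvRL]
  | cons d t ih =>
    intro c n out
    by_cases h : d = c
    · subst h
      simp only [List.foldl_cons, pvRunStep, List.takeWhile_cons, List.dropWhile_cons,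
        beq_self_eq_true, if_true]
      rw [ih d (n + 1) out]
      simp [List.length_cons]
      ring_nf
    · have hbeq : (d == c) = false := by simp [h]
      simp only [List.foldl_cons, pvRunStep]
      rw [if_neg (by simp [h, eq_comm])]
      simp only [Option.isSome_some, if_true]
      rw [ih d 1 (out ++ [n])]
      simp [hbeq, pvRL]
      ring_nf

theorem pvRuns_eq (s : String) :
    pvRuns s = pvRL (PySem.List.sorted s.toList (fun c => c) false) := by
  unfold pvRuns
  cases hm : PySem.List.sorted s.toList (fun c => c) false with
  | nil => simp [pvRL]
  | cons c t =>
    have h0 : pvRunStep ([], none, 0) c = ([], some c, 1) := by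
      simp [pvRunStep]
    show pvFin ((c :: t).foldl pvRunStep ([], none, 0)) = _
    rw [List.foldl_cons, h0, pv_fold_runs t c 1 []]
    simp [pvRL]
    ring_nf

-- in a ≤-sorted tail headed (below) by c, dropWhile(==c) contains no more c
theorem pv_not_mem_dropWhile (t : List Char) : ∀ (c : Char), (∀ y ∈ t, c ≤ y) → t.Pairwise (· ≤ ·) →
    c ∉ t.dropWhile (· == c) := by
  induction t with
  | nil => intro c _ _; simp
  | cons d t ih =>
    intro c hle hp
    rw [List.pairwise_cons] at hp
    by_cases h : d = c
    · subst h
      rw [List.dropWhile_cons_of_pos (by simp)]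
      exact ih d (fun y hy => hp.1 y hy) hp.2
    · rw [List.dropWhile_cons_of_neg (by simp [h])]
      have hcd : c < d := lt_of_le_of_ne (hle d (by simp)) (Ne.symm h)
      intro hmem
      rcases List.mem_cons.mp hmem with h1 | h1
      · exact absurd h1.symm h
      · exact absurd rfl (ne_of_gt (lt_of_lt_of_le hcd (hp.1 c h1)))

-- count of the head char is the takeWhile prefix length (sorted tail)
theorem pv_count_head (t : List Char) (c : Char) (hle : ∀ y ∈ t, c ≤ y) (hp : t.Pairwise (· ≤ ·)) :
    t.count c = (t.takeWhile (· == c)).length := by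
  conv_lhs => rw [← List.takeWhile_append_dropWhile (p := (· == c)) (l := t)]
  rw [List.count_append]
  have h1 : (t.takeWhile (· == c)).count c = (t.takeWhile (· == c)).length := by
    rw [List.count_eq_length]
    intro b hb
    have hb' : b = c := by simpa using List.mem_takeWhile_imp hb
    simp [hb']
  have h2 : (t.dropWhile (· == c)).count c = 0 := by
    rw [List.count_eq_zero]
    exact pv_not_mem_dropWhile t c hle hp
  omega

-- counts of non-head chars pass to the dropWhile suffix
theorem pv_count_other (t : List Char) (c c' : Char) (hne : c' ≠ c) :
    (c :: t).count c' = (t.dropWhile (· == c)).count c' := by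
  conv_lhs => rw [← List.takeWhile_append_dropWhile (p := (· == c)) (l := t)]
  rw [List.count_cons, List.count_append]
  have h1 : (t.takeWhile (· == c)).count c' = 0 := by
    rw [List.count_eq_zero]
    intro hmem
    exact hne (by simpa using List.mem_takeWhile_imp hmem)
  simp [h1, Ne.symm hne]

-- membership in the run-length list of a sorted list = being a multiplicity
theorem pv_mem_pvRL (m : List Char) (hp : m.Pairwise (· ≤ ·)) (x : Int) :
    x ∈ pvRL m ↔ ∃ c ∈ m, (m.count c : Int) = x := by
  induction m using pvRL.induct with
  | case1 => simp [pvRL]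
  | case2 c t ih =>
    rw [List.pairwise_cons] at hp
    have hle := hp.1
    have hdp : (t.dropWhile (· == c)).Pairwise (· ≤ ·) :=
      hp.2.sublist (List.dropWhile_sublist _)
    have hcount : (c :: t).count c = (t.takeWhile (· == c)).length + 1 := by
      rw [List.count_cons_self, pv_count_head t c hle hp.2]
    rw [pvRL, List.mem_cons, ih hdp]
    constructor
    · rintro (rfl | ⟨c', hc', rfl⟩)
      · exact ⟨c, by simp, by rw [hcount]; push_cast; ring⟩
      · have hc'ne : c' ≠ c := fun h => by
          subst h; exact pv_not_mem_dropWhile t c' hle hp.2 hc'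
        refine ⟨c', List.mem_cons_of_mem c ((List.dropWhile_sublist _).mem hc'), ?_⟩
        rw [pv_count_other t c c' hc'ne]
    · rintro ⟨c', hc', rfl⟩
      by_cases h : c' = c
      · subst h
        left; rw [hcount]; push_cast; ring
      · right
        have hct : c' ∈ t := by
          rcases List.mem_cons.mp hc' with h1 | h1
          · exact absurd h1 h
          · exact h1
        have hcd : c' ∈ t.dropWhile (· == c) := by
          have : c' ∈ t.takeWhile (· == c) ++ t.dropWhile (· == c) := by
            rwa [List.takeWhile_append_dropWhile]
          rcases List.mem_append.mp this with h1 | h1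
          · exact absurd (by simpa using List.mem_takeWhile_imp h1) h
          · exact h1
        exact ⟨c', hcd, by rw [← pv_count_other t c c' h]⟩

-- copying a list element by element is the identity (A's value-copy loops)
theorem pv_copy_id (l : List Int) : l.foldl (fun acc count => acc ++ [count]) [] = l := by
  simpa using PySem.List.foldl_append_singleton l []

-- the values of A's counting loop's dict are the multiplicities of the distinct chars
theorem pv_values_counter (l : List Char) :
    (l.foldl (fun d c => d.modify c 0 (· + 1)) PySem.Dict.empty).values
      = (PySem.Set.ofList l).map (fun c => (l.count c : Int)) := by
  rw [← PySem.Dict.counter_eq_foldl]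
  simp [PySem.Dict.values, PySem.Dict.items_counter, List.map_map]

-- two-way all-membership equals set equality of the deduplicated lists
theorem pv_mutual_eq_equal (v w : List Int) :
    ((v.all (fun x => w.contains x)) && (w.all (fun x => v.contains x)))
      = PySem.Set.equal (PySem.Set.ofList v) (PySem.Set.ofList w) := by
  rw [Bool.eq_iff_iff]
  simp only [Bool.and_eq_true, List.all_eq_true, PySem.Set.equal_iff, PySem.Set.mem_ofList,
    List.contains_eq_mem, decide_eq_true_eq]
  constructor
  · rintro ⟨h1, h2⟩ x; exact ⟨fun hx => h1 x hx, fun hx => h2 x hx⟩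
  · intro h; exact ⟨fun x hx => (h x).1 hx, fun x hx => (h x).2 hx⟩

-- pvRuns of a string has exactly the multiplicities of its chars as members
theorem pv_mem_pvRuns (s : String) (x : Int) :
    x ∈ pvRuns s ↔ ∃ c ∈ s.toList, (s.toList.count c : Int) = x := by
  rw [pvRuns_eq]
  have hperm : (PySem.List.sorted s.toList (fun c => c) false).Perm s.toList :=
    PySem.List.sorted_perm s.toList _ _
  rw [pv_mem_pvRL _ (by simpa using PySem.List.sorted_pairwise s.toList (fun c => c))]
  constructor
  · rintro ⟨c, hc, rfl⟩
    exact ⟨c, hperm.mem_iff.mp hc, by rw [hperm.count_eq]⟩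
  · rintro ⟨c, hc, rfl⟩
    exact ⟨c, hperm.mem_iff.mpr hc, by rw [hperm.count_eq]⟩

-- Set.equal only depends on memberships
theorem pv_equal_congr (v v' w w' : List Int)
    (hv : ∀ x, x ∈ v ↔ x ∈ v') (hw : ∀ x, x ∈ w ↔ x ∈ w') :
    PySem.Set.equal (PySem.Set.ofList v) (PySem.Set.ofList w)
      = PySem.Set.equal (PySem.Set.ofList v') (PySem.Set.ofList w') := by
  rw [Bool.eq_iff_iff]
  simp only [PySem.Set.equal_iff, PySem.Set.mem_ofList]
  constructor
  · intro h x; rw [← hv x, ← hw x]; exact h x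
  · intro h x; rw [hv x, hw x]; exact h x

-- ===== VERDICT (by name: the statement is the Claim_ definition above) =====
theorem find_match_string_spec : Claim_equal_find_match_string := by
  intro s1 s2 _ hpre
  obtain ⟨h1, h2⟩ := hpre
  match s1, s2 with
  | none, _ => exact absurd rfl h1
  | some a, none => exact absurd rfl h2
  | some a, some b =>
    unfold Spec_find_match_string find_match_string find_match_string_alt
    by_cases hlen : a.toList.length = b.toList.length
    · simp only [hlen, ne_eq, not_true_eq_false, if_false]
      rw [pv_copy_id, pv_copy_id, pv_values_counter, pv_values_counter]
      rw [pv_equal_congr (pvRuns a) ((PySem.Set.ofList a.toList).map (fun c => (a.toList.count c : Int)))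
        (pvRuns b) ((PySem.Set.ofList b.toList).map (fun c => (b.toList.count c : Int)))
        (fun x => by rw [pv_mem_pvRuns]; simp [PySem.Set.mem_ofList])
        (fun x => by rw [pv_mem_pvRuns]; simp [PySem.Set.mem_ofList])]
      rw [← pv_mutual_eq_equal]
      cases hv1 : ((PySem.Set.ofList a.toList).map (fun c => (a.toList.count c : Int))).all
          (fun x => ((PySem.Set.ofList b.toList).map (fun c => (b.toList.count c : Int))).contains x) <;>
        cases hv2 : ((PySem.Set.ofList b.toList).map (fun c => (b.toList.count c : Int))).all
          (fun x => ((PySem.Set.ofList a.toList).map (fun c => (a.toList.count c : Int))).contains x) <;>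
        simp
    · have hlen' : ¬ a.length = b.length := by simpa using hlen
      simp [hlen']
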